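-- pv_equiv track=rewrite | github.com/MrBrantCode/unitest_baseline | mut_generate/mist_train_cf/cf_46679/solution.py | find_val_indices_freq
-- ===== SOURCE A (Python) =====
-- def find_val_indices_freq(lst, val):
--     """
--     Returns a tuple containing the first index of the value in the list,
--     the last index of the value in the list, and the frequency of the value in the list.
--
--     Args:
--         lst (list): A list that can contain both numbers and strings.
--         val: The value to be searched in the list.
--
--     Returns:
--         tuple: A tuple containing the first index, last index, and frequency of the value.
--     """
--     first_index = -1
--     last_index = -1
--     freq = 0
--     for i in range(len(lst)):
--         if lst[i] == val:
--             if first_index == -1: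
--                 first_index = i
--             last_index = i
--             freq += 1
--     return (first_index, last_index, freq)
-- ===== SOURCE B (Python) =====
-- def find_val_indices_freq(lst, val):
--     freq = lst.count(val)
--     if freq == 0:
--         return (-1, -1, 0)
--     first = lst.index(val)
--     last = len(lst) - 1 - lst[::-1].index(val)
--     return (first, last, freq)
-- ===== Notes on version B (the rewrite author's own statement) =====
-- stated objective: idiomatic
-- what changed: Replaced the single accumulating index loop by built-in multi-pass scans: count once, then index for the first position and a reversed-list index mapped back for the last position.
import Mathlib
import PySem

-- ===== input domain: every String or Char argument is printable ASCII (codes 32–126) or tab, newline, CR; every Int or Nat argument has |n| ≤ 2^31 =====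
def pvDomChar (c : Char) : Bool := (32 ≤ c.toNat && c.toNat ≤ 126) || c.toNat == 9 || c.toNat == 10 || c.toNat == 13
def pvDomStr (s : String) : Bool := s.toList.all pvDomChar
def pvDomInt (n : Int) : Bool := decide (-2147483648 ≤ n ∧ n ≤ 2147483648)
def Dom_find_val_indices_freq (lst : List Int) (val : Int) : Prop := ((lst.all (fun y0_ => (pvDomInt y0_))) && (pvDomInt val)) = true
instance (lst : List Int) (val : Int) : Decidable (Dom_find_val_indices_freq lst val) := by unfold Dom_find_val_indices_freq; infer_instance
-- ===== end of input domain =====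

-- B replaces A's single accumulating index loop with idiomatic multi-pass built-ins
-- (count, index, reversed index); same O(n) cost, no behaviour change.


-- ===== PORT A =====
-- 'for i in range(len(lst)): if lst[i] == val: …' with state (first_index, last_index, freq)
def find_val_indices_freq (lst : List Int) (val : Int) : Int × Int × Int :=
  (PySem.List.pyRange 0 (lst.length : Int) 1).foldl
    (fun (s : Int × Int × Int) i =>
      if PySem.List.pyGetD lst i 0 = val then
        (if s.1 = -1 then i else s.1, i, s.2.2 + 1)
      else s)
    (-1, -1, 0)

-- ===== PORT B =====
-- freq = lst.count(val); if 0 → (-1,-1,0); else first = lst.index(val),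
-- last = len(lst) - 1 - lst[::-1].index(val).  index() cannot raise here since freq ≠ 0,
-- so its Option is discharged with getD 0 (never taken).
def find_val_indices_freq_alt (lst : List Int) (val : Int) : Int × Int × Int :=
  let freq : Int := (PySem.List.count lst val : Int)
  if freq = 0 then (-1, -1, 0)
  else
    let first : Int := ((PySem.List.index? lst val).getD 0 : Int)
    let last : Int := (lst.length : Int) - 1 -
      ((PySem.List.index? ((PySem.List.slice? lst none none (-1)).getD []) val).getD 0 : Int)
    (first, last, freq)

-- ===== PRECONDITION & SPEC =====
def Spec_find_val_indices_freq (lst : List Int) (val : Int) (out : Int × Int × Int) : Prop := out = find_val_indices_freq_alt lst val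
instance (lst : List Int) (val : Int) (out : Int × Int × Int) : Decidable (Spec_find_val_indices_freq lst val out) := by unfold Spec_find_val_indices_freq; infer_instance

-- ===== CLAIM (what is proved, stated in full; the proofs are below) =====
def Claim_equal_find_val_indices_freq : Prop := ∀ (lst : List Int) (val : Int), Dom_find_val_indices_freq lst val → Spec_find_val_indices_freq lst val (find_val_indices_freq lst val)

-- ===== LEMMAS AND PROOFS =====

-- A's fold over (xs ++ [x]) is the fold over xs followed by one step on x at index xs.length.
theorem pvA_snoc (xs : List Int) (x val : Int) :
    find_val_indices_freq (xs ++ [x]) val =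
      (fun (s : Int × Int × Int) =>
        if x = val then
          (if s.1 = -1 then (xs.length : Int) else s.1, (xs.length : Int), s.2.2 + 1)
        else s) (find_val_indices_freq xs val) := by
  unfold find_val_indices_freq
  have hlen : ((xs ++ [x]).length : Int) = (xs.length : Int) + 1 := by
    simp [List.length_append]
  rw [hlen, PySem.List.pyRange_one_succ_right (by positivity), List.foldl_append]
  have hcongr :
      (PySem.List.pyRange 0 (xs.length : Int) 1).foldl
        (fun (s : Int × Int × Int) i =>
          if PySem.List.pyGetD (xs ++ [x]) i 0 = val then
            (if s.1 = -1 then i else s.1, i, s.2.2 + 1)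
          else s) (-1, -1, 0)
      = (PySem.List.pyRange 0 (xs.length : Int) 1).foldl
        (fun (s : Int × Int × Int) i =>
          if PySem.List.pyGetD xs i 0 = val then
            (if s.1 = -1 then i else s.1, i, s.2.2 + 1)
          else s) (-1, -1, 0) := by
    apply PySem.List.foldl_congr_mem
    intro acc i hi
    rw [PySem.List.mem_pyRange_one] at hi
    have h0 : 0 ≤ i := hi.1
    have h1 : i < (xs.length : Int) := hi.2
    have hik : i = (i.toNat : Int) := (Int.toNat_of_nonneg h0).symm
    have hlt : i.toNat < xs.length := by omega
    rw [hik, PySem.List.pyGetD_natCast, PySem.List.pyGetD_natCast,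
        List.getD_eq_getElem?_getD, List.getD_eq_getElem?_getD,
        List.getElem?_append_left hlt]
  rw [hcongr]
  have hget : PySem.List.pyGetD (xs ++ [x]) (xs.length : Int) 0 = x := by
    rw [PySem.List.pyGetD_natCast, List.getD_eq_getElem?_getD]
    simp
  simp only [List.foldl_cons, List.foldl_nil, hget]

-- B's value at a snoc, expressed through the same one-step function.
theorem pvB_snoc (xs : List Int) (x val : Int) :
    find_val_indices_freq_alt (xs ++ [x]) val =
      (fun (s : Int × Int × Int) =>
        if x = val then
          (if s.1 = -1 then (xs.length : Int) else s.1, (xs.length : Int), s.2.2 + 1)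
        else s) (find_val_indices_freq_alt xs val) := by
  unfold find_val_indices_freq_alt
  simp only [PySem.List.slice?_none_none_neg_one, Option.getD_some,
    PySem.List.count_eq, List.count_append, List.reverse_append, List.reverse_cons,
    List.reverse_nil, List.nil_append, List.singleton_append]
  by_cases hx : x = val
  · subst hx
    have hc1 : ([x].count x) = 1 := by simp
    rw [hc1]
    by_cases hmem : x ∈ xs
    · rw [PySem.List.index?_append_of_mem _ hmem, PySem.List.index?_cons_self]
      obtain ⟨k, hk⟩ := Option.isSome_iff_exists.mp
        ((PySem.List.index?_isSome_iff xs x).mpr hmem)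
      rw [hk]
      have hcpos : 0 < xs.count x := List.count_pos_iff.mpr hmem
      simp only [Option.getD_some, List.length_append, List.length_singleton]
      split_ifs <;> first
        | rfl
        | (exfalso; omega)
        | (simp only [Prod.mk.injEq]; (try push_cast); (try simp only [true_and, and_true]); omega)
    · have hc0 : xs.count x = 0 := List.count_eq_zero.mpr hmem
      rw [PySem.List.index?_append_singleton_self xs x hmem, PySem.List.index?_cons_self]
      simp [hc0, List.length_append]
  · have hc1 : ([x].count val) = 0 :=
      List.count_eq_zero.mpr (by simp only [List.mem_singleton]; exact fun h => hx h.symm)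
    rw [hc1]
    by_cases hmem : val ∈ xs
    · have hcpos : 0 < xs.count val := List.count_pos_iff.mpr hmem
      rw [PySem.List.index?_append_of_mem _ hmem,
          PySem.List.index?_cons_of_ne xs.reverse hx]
      obtain ⟨r, hr⟩ := Option.isSome_iff_exists.mp
        ((PySem.List.index?_isSome_iff xs.reverse val).mpr (by simpa using hmem))
      rw [hr]
      obtain ⟨k, hk⟩ := Option.isSome_iff_exists.mp
        ((PySem.List.index?_isSome_iff xs val).mpr hmem)
      rw [hk]
      simp only [Option.map_some, Option.getD_some, List.length_append,
        List.length_singleton]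
      split_ifs <;> first
        | rfl
        | (exfalso; omega)
        | (simp only [Prod.mk.injEq]; (try push_cast); (try simp only [true_and, and_true]); omega)
    · have hc0 : xs.count val = 0 := List.count_eq_zero.mpr hmem
      simp [hc0, hx]

-- Base case and main equivalence by reverse induction.
theorem pv_main (lst : List Int) (val : Int) :
    find_val_indices_freq lst val = find_val_indices_freq_alt lst val := by
  induction lst using List.reverseRecOn with
  | nil =>
      simp [find_val_indices_freq, find_val_indices_freq_alt,
        PySem.List.pyRange_one_eq_nil (by omega : (0:Int) ≤ 0)]
  | append_singleton xs x ih =>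
      rw [pvA_snoc, pvB_snoc, ih]

-- ===== VERDICT (by name: the statement is the Claim_ definition above) =====
theorem find_val_indices_freq_spec : Claim_equal_find_val_indices_freq := by
  intro lst val _
  exact pv_main lst val
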